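-- pv_equiv track=rewrite | github.com/benquick123/code-profiling | code/batch-1/vse-naloge-brez-testov/DN6-M-98.py | besedilo
-- ===== SOURCE A (Python) =====
-- def besedilo(tvit):
--     a = tvit.split(": ")
--     rezultat = ""
--     for i in range(len(a)):
--         if i > 1:
--             rezultat += ": "
--         if i != 0:
--             rezultat += a[i]
--     return rezultat
-- ===== SOURCE B (Python) =====
-- def besedilo(tvit):
--     i = tvit.find(": ")
--     return tvit[i + 2:] if i != -1 else ""
-- ===== Notes on version B (the rewrite author's own statement) =====
-- stated objective: idiomatic
-- what changed: Instead of splitting the whole string into all separator-delimited pieces and re-joining everything after the first, B locates the first separator with find and returns one slice after it (empty when absent).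
import Mathlib
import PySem

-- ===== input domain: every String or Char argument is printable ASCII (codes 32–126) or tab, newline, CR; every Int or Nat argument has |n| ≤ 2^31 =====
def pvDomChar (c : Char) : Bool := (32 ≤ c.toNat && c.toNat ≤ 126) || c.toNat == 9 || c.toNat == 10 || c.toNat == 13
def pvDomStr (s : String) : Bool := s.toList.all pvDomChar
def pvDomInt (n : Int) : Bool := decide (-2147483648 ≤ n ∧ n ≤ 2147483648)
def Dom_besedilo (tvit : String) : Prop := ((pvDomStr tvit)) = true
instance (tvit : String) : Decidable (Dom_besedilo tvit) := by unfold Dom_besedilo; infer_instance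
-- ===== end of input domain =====

-- B replaces A's split-into-all-pieces-and-rejoin by a single find of the first ": " and one slice (idiomatic, same O(n) cost).

-- ===== PORT A =====
-- a[i] is always accessed with 0 ≤ i < len(a), so pyGetD's default is never used.
def besedilo (tvit : String) : String :=
  let a : List (List Char) := PySem.Chars.splitOn tvit.toList ": ".toList
  let rezultat : List Char :=
    (PySem.List.pyRange 0 (PySem.List.len a)).foldl
      (fun rezultat i =>
        let rezultat := if (1 : Int) < i then rezultat ++ ": ".toList else rezultat
        if i ≠ (0 : Int) then rezultat ++ PySem.List.pyGetD a i [] else rezultat)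
      []
  String.ofList rezultat

-- ===== PORT B =====
def besedilo_alt (tvit : String) : String :=
  let i := PySem.Str.find tvit ": "
  if i ≠ -1 then PySem.Str.slice tvit (some (i + 2)) none else ""

-- ===== PRECONDITION & SPEC =====
def Spec_besedilo (tvit : String) (out : String) : Prop := out = besedilo_alt tvit
instance (tvit : String) (out : String) : Decidable (Spec_besedilo tvit out) := by unfold Spec_besedilo; infer_instance

-- ===== CLAIM (what is proved, stated in full; the proofs are below) =====
def Claim_equal_besedilo : Prop := ∀ (tvit : String), Dom_besedilo tvit → Spec_besedilo tvit (besedilo tvit)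

-- ===== LEMMAS AND PROOFS =====

-- A's loop body, named so the fold lemmas below can state facts about it.
def pvStep (sep : List Char) (a : List (List Char)) (rezultat : List Char) (i : Int) : List Char :=
  let rezultat := if (1 : Int) < i then rezultat ++ sep else rezultat
  if i ≠ (0 : Int) then rezultat ++ PySem.List.pyGetD a i [] else rezultat

-- The accumulator of splitOn.go is a prefix of the final answer.
theorem pv_go_acc (sep : List Char) (fuel : Nat) (l cur : List Char) (acc : List (List Char)) :
    PySem.Chars.splitOn.go sep fuel l cur acc = acc.reverse ++ PySem.Chars.splitOn.go sep fuel l cur [] := by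
  induction fuel generalizing l cur acc with
  | zero => simp [PySem.Chars.splitOn.go]
  | succ n ih =>
    cases l with
    | nil => simp [PySem.Chars.splitOn.go]
    | cons c rest =>
      by_cases h : sep.isPrefixOf (c :: rest)
      · simp only [PySem.Chars.splitOn.go, h, if_true]
        rw [ih _ _ (cur.reverse :: acc), ih _ _ [cur.reverse]]
        simp
      · simp only [PySem.Chars.splitOn.go, h]
        exact ih _ _ _

-- Fuel is irrelevant as long as it exceeds the length of the remaining input.
theorem pv_go_fuel (sep : List Char) (hsep : sep ≠ []) (fuel fuel' : Nat) (l cur : List Char)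
    (acc : List (List Char)) (h : l.length < fuel) (h' : l.length < fuel') :
    PySem.Chars.splitOn.go sep fuel l cur acc = PySem.Chars.splitOn.go sep fuel' l cur acc := by
  induction fuel generalizing fuel' l cur acc with
  | zero => omega
  | succ n ih =>
    cases fuel' with
    | zero => omega
    | succ m =>
      cases l with
      | nil => simp [PySem.Chars.splitOn.go]
      | cons c rest =>
        have hsl : 1 ≤ sep.length := by
          cases sep with | nil => exact absurd rfl hsep | cons _ _ => simp
        by_cases hp : sep.isPrefixOf (c :: rest)
        · simp only [PySem.Chars.splitOn.go, hp, if_true]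
          exact ih _ _ _ _
            (by rw [List.length_drop]; simp only [List.length_cons] at h ⊢; omega)
            (by rw [List.length_drop]; simp only [List.length_cons] at h' ⊢; omega)
        · simp only [PySem.Chars.splitOn.go, hp]
          exact ih _ _ _ _
            (by simp only [List.length_cons] at h; omega)
            (by simp only [List.length_cons] at h'; omega)

-- If the separator occurs nowhere, the whole rest becomes one final piece.
theorem pv_go_no_match (sep : List Char) (hsep : sep ≠ []) (fuel : Nat) (l cur : List Char)
    (acc : List (List Char)) (h : l.length < fuel) (hno : ¬ sep <:+: l) :
    PySem.Chars.splitOn.go sep fuel l cur acc = acc.reverse ++ [cur.reverse ++ l] := by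
  induction fuel generalizing l cur acc with
  | zero => omega
  | succ n ih =>
    cases l with
    | nil => simp [PySem.Chars.splitOn.go]
    | cons c rest =>
      have hp : ¬ sep.isPrefixOf (c :: rest) := by
        intro hp
        exact hno (List.isPrefixOf_iff_prefix.mp hp).isInfix
      simp only [PySem.Chars.splitOn.go, hp]
      rw [ih rest (c :: cur) acc (by simp only [List.length_cons] at h; omega)
        (fun hi => hno (hi.trans (List.suffix_cons c rest).isInfix))]
      simp

-- If the first occurrence of the separator is at position j, splitOn splits there.
theorem pv_go_first_match (sep : List Char) (hsep : sep ≠ []) (fuel : Nat) (l cur : List Char)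
    (acc : List (List Char)) (j : Nat) (h : l.length < fuel)
    (hj : sep <+: l.drop j) (hmin : ∀ i < j, ¬ sep <+: l.drop i) :
    PySem.Chars.splitOn.go sep fuel l cur acc =
      acc.reverse ++ ((cur.reverse ++ l.take j) ::
        PySem.Chars.splitOn (l.drop (j + sep.length)) sep) := by
  induction fuel generalizing l cur acc j with
  | zero => omega
  | succ n ih =>
    have hsl : 1 ≤ sep.length := by
      cases sep with | nil => exact absurd rfl hsep | cons _ _ => simp
    cases l with
    | nil =>
      exfalso
      have := hj.length_le
      simp only [List.drop_nil, List.length_nil] at this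
      omega
    | cons c rest =>
      cases j with
      | zero =>
        have hp : sep.isPrefixOf (c :: rest) := List.isPrefixOf_iff_prefix.mpr (by simpa using hj)
        simp only [PySem.Chars.splitOn.go, hp, if_true]
        have hm : ((c :: rest).drop sep.length).length < n := by
          have := List.IsPrefix.length_le (by simpa using hj : sep <+: (c :: rest))
          rw [List.length_drop]
          simp only [List.length_cons] at h this ⊢
          omega
        rw [pv_go_acc, pv_go_fuel sep hsep n (((c :: rest).drop sep.length).length + 1) _ _ _ hm
          (by omega)]
        simp [PySem.Chars.splitOn]
      | succ j' =>
        have hp : ¬ sep.isPrefixOf (c :: rest) := by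
          intro hp
          exact hmin 0 (by omega) (by simpa using List.isPrefixOf_iff_prefix.mp hp)
        simp only [PySem.Chars.splitOn.go, hp]
        rw [ih rest (c :: cur) acc j' (by simp only [List.length_cons] at h; omega)
          (by simpa using hj) (fun i hi => by simpa using hmin (i + 1) (by omega))]
        rw [show j' + 1 + sep.length = (j' + sep.length) + 1 by omega]
        simp

theorem pv_splitOn_no_match (sep : List Char) (hsep : sep ≠ []) (l : List Char)
    (hno : ¬ sep <:+: l) : PySem.Chars.splitOn l sep = [l] := by
  rw [show PySem.Chars.splitOn l sep = PySem.Chars.splitOn.go sep (l.length + 1) l [] [] from rfl,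
    pv_go_no_match sep hsep _ l [] [] (by omega) hno]
  simp

theorem pv_splitOn_first_match (sep : List Char) (hsep : sep ≠ []) (l : List Char) (j : Nat)
    (hj : sep <+: l.drop j) (hmin : ∀ i < j, ¬ sep <+: l.drop i) :
    PySem.Chars.splitOn l sep =
      l.take j :: PySem.Chars.splitOn (l.drop (j + sep.length)) sep := by
  rw [show PySem.Chars.splitOn l sep = PySem.Chars.splitOn.go sep (l.length + 1) l [] [] from rfl,
    pv_go_first_match sep hsep _ l [] [] j (by omega) hj hmin]
  simp

theorem pv_go_ne_nil (sep : List Char) (fuel : Nat) (l cur : List Char) (acc : List (List Char)) :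
    PySem.Chars.splitOn.go sep fuel l cur acc ≠ [] := by
  induction fuel generalizing l cur acc with
  | zero => simp [PySem.Chars.splitOn.go]
  | succ n ih =>
    cases l with
    | nil => simp [PySem.Chars.splitOn.go]
    | cons c rest =>
      by_cases hp : sep.isPrefixOf (c :: rest)
      · simp only [PySem.Chars.splitOn.go, hp, if_true]
        exact ih _ _ _
      · simp only [PySem.Chars.splitOn.go, hp]
        exact ih _ _ _

theorem pv_splitOn_ne_nil (sep : List Char) (l : List Char) :
    PySem.Chars.splitOn l sep ≠ [] := pv_go_ne_nil sep (l.length + 1) l [] []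

theorem pv_intercalate_cons (sep y : List Char) (L : List (List Char)) (hL : L ≠ []) :
    sep.intercalate (y :: L) = y ++ sep ++ sep.intercalate L := by
  cases L with
  | nil => exact absurd rfl hL
  | cons z t => simp [List.intercalate, List.intersperse]

theorem pv_intercalate_flat (sep y : List Char) (L : List (List Char)) :
    sep.intercalate (y :: L) = y ++ (L.map (fun p => sep ++ p)).flatten := by
  induction L generalizing y with
  | nil => simp [List.intercalate]
  | cons z t ih =>
    rw [pv_intercalate_cons sep y (z :: t) (by simp), ih]
    simp

-- Rejoining the pieces of splitOn with the separator restores the string.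
theorem pv_join_splitOn (sep : List Char) (hsep : sep ≠ []) (l : List Char) :
    sep.intercalate (PySem.Chars.splitOn l sep) = l := by
  induction hn : l.length using Nat.strong_induction_on generalizing l with
  | _ n ih =>
    by_cases hin : sep <:+: l
    · have hfind : 0 ≤ PySem.Chars.find l sep := (PySem.Chars.find_nonneg_iff l sep).mpr hin
      obtain ⟨hpre, hmin⟩ := PySem.Chars.find_spec hfind
      set j := (PySem.Chars.find l sep).toNat with hjdef
      have hsl : 1 ≤ sep.length := by
        cases sep with | nil => exact absurd rfl hsep | cons _ _ => simp
      have hjl : j + sep.length ≤ l.length := by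
        have h1 := hpre.length_le
        rw [List.length_drop] at h1
        have h2 : (PySem.Chars.find l sep) ≤ (l.length : Int) := PySem.Chars.find_le_length l sep
        omega
      rw [pv_splitOn_first_match sep hsep l j hpre hmin,
        pv_intercalate_cons sep _ _ (pv_splitOn_ne_nil sep _),
        ih ((l.drop (j + sep.length)).length) (by rw [List.length_drop]; omega) _ rfl]
      obtain ⟨t, ht⟩ := hpre
      have htd : t = l.drop (j + sep.length) := by
        have h1 : t = (l.drop j).drop sep.length := by rw [← ht, List.drop_left]
        rw [h1, List.drop_drop]
      calc l.take j ++ sep ++ l.drop (j + sep.length)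
          = l.take j ++ (sep ++ t) := by rw [htd]; simp
        _ = l.take j ++ l.drop j := by rw [ht]
        _ = l := List.take_append_drop j l
    · rw [pv_splitOn_no_match sep hsep l hin]
      simp [List.intercalate]

-- The tail of the fold: from index k ≥ 2 on, each step appends "sep ++ piece".
theorem pv_fold_tail (sep : List Char) (a : List (List Char)) (x : List Char) (k : Nat)
    (hk : 2 ≤ k) :
    (PySem.List.pyRange (k : Int) (PySem.List.len a)).foldl (pvStep sep a) x
    = x ++ ((a.drop k).map (fun p => sep ++ p)).flatten := by
  induction hm : a.length - k generalizing k x with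
  | zero =>
    have hge : a.length ≤ k := by omega
    rw [PySem.List.pyRange_one_eq_nil (by simp [PySem.List.len]; exact_mod_cast hge)]
    simp [List.drop_eq_nil_of_le hge]
  | succ m ih =>
    have hlt : k < a.length := by omega
    rw [PySem.List.pyRange_one_cons (by simp [PySem.List.len]; exact_mod_cast hlt),
      List.foldl_cons]
    have hstep : pvStep sep a x (k : Int) = x ++ sep ++ a[k] := by
      have h1 : (1 : Int) < (k : Int) := by exact_mod_cast hk
      have h0 : ((k : Int) ≠ (0 : Int)) := Int.natCast_ne_zero.mpr (by omega)
      have hget : PySem.List.pyGetD a (k : Int) [] = a[k] := by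
        simp [PySem.List.pyGetD, PySem.List.pyGet?_natCast, List.getElem?_eq_getElem hlt]
      simp only [pvStep]
      rw [if_pos h0, if_pos h1, hget]
    rw [hstep, show ((k : Int) + 1) = ((k + 1 : Nat) : Int) by push_cast; ring,
      ih (x ++ sep ++ a[k]) (k + 1) (by omega) (by omega),
      List.drop_eq_getElem_cons hlt, List.map_cons, List.flatten_cons]
    simp [List.append_assoc]

-- A's whole loop computes "join the pieces after the first with the separator".
theorem pv_fold_eq_join (sep : List Char) (a : List (List Char)) :
    (PySem.List.pyRange 0 (PySem.List.len a)).foldl (pvStep sep a) []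
    = sep.intercalate a.tail := by
  match a with
  | [] =>
    rw [PySem.List.pyRange_one_eq_nil (by simp [PySem.List.len])]
    simp [List.intercalate]
  | [x] =>
    rw [PySem.List.pyRange_one_cons (by simp [PySem.List.len]),
      PySem.List.pyRange_one_eq_nil (by simp [PySem.List.len]), List.foldl_cons]
    simp [pvStep, List.intercalate]
  | x :: y :: t =>
    have hl2 : (2 : Int) ≤ PySem.List.len (x :: y :: t) := by
      simp [PySem.List.len]; omega
    rw [PySem.List.pyRange_one_cons (by omega), PySem.List.pyRange_one_cons (by omega),
      List.foldl_cons, List.foldl_cons]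
    have e0 : pvStep sep (x :: y :: t) [] 0 = [] := by norm_num [pvStep]
    have e1 : pvStep sep (x :: y :: t) [] (0 + 1) = y := by
      norm_num [pvStep]
      rw [show ((1 : Int)) = ((1 : Nat) : Int) by norm_num]
      simp [PySem.List.pyGetD, PySem.List.pyGet?_natCast]
    rw [e0, e1, show ((0 : Int) + 1 + 1) = ((2 : Nat) : Int) by norm_num,
      pv_fold_tail sep (x :: y :: t) y 2 (by omega)]
    rw [List.tail_cons, pv_intercalate_flat]
    simp

-- A computes exactly "join with ': ' everything after the first piece of the split".
theorem pv_A_eq (tvit : String) :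
    besedilo tvit = String.ofList
      ((": ".toList).intercalate (PySem.Chars.splitOn tvit.toList ": ".toList).tail) := by
  show String.ofList
      ((PySem.List.pyRange 0 (PySem.List.len (PySem.Chars.splitOn tvit.toList ": ".toList))).foldl
        (pvStep ": ".toList (PySem.Chars.splitOn tvit.toList ": ".toList)) []) = _
  rw [pv_fold_eq_join]

-- ===== VERDICT (by name: the statement is the Claim_ definition above) =====
theorem besedilo_spec : Claim_equal_besedilo := by
  intro tvit _
  unfold Spec_besedilo besedilo_alt
  rw [pv_A_eq]
  have hs : ": ".toList = [':', ' '] := rfl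
  have hsep : ": ".toList ≠ [] := by rw [hs]; simp
  have hsf : PySem.Str.find tvit ": " = PySem.Chars.find tvit.toList ": ".toList := rfl
  have hlen2 : (": ".toList).length = 2 := by rw [hs]; rfl
  by_cases hin : ": ".toList <:+: tvit.toList
  · have hfind : 0 ≤ PySem.Chars.find tvit.toList ": ".toList :=
      (PySem.Chars.find_nonneg_iff _ _).mpr hin
    obtain ⟨hpre, hmin⟩ := PySem.Chars.find_spec hfind
    have hne : PySem.Str.find tvit ": " ≠ -1 := by rw [hsf]; omega
    rw [if_pos hne, pv_splitOn_first_match _ hsep _ _ hpre hmin, List.tail_cons,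
      pv_join_splitOn _ hsep]
    have hslice : PySem.Str.slice tvit (some (PySem.Str.find tvit ": " + 2)) none
        = String.ofList (tvit.toList.drop (PySem.Str.find tvit ": " + 2).toNat) := by
      simp only [PySem.Str.slice, PySem.Chars.slice_eq_listSlice]
      rw [PySem.List.slice_from _ (by rw [hsf]; omega)]
    rw [hslice]
    congr 2
    rw [hlen2, hsf]
    omega
  · have hfind : PySem.Chars.find tvit.toList ": ".toList = -1 :=
      (PySem.Chars.find_eq_neg_one_iff _ _).mpr hin
    have hne : ¬ (PySem.Str.find tvit ": " ≠ -1) := by rw [hsf, hfind]; simp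
    rw [if_neg hne, pv_splitOn_no_match _ hsep _ hin]
    show String.ofList ((": ".toList).intercalate (List.tail [tvit.toList])) = ""
    rfl
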